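-- pv_equiv track=rewrite | github.com/RamizIlyas/pdfToLawsDB | performanceRagTest.py | _is_relevant_section
-- ===== SOURCE A (Python) =====
-- def _is_relevant_section(section_num, query):
--     """Check if section number is relevant to query"""
--     query_lower = query.lower()
--     section_mapping = {
--         "murder": ["300", "301", "302", "304"],
--         "theft": ["378", "379", "380", "381", "382"],
--         "assault": ["351", "352", "353", "350"],
--         "fraud": ["415", "416", "417", "420"],
--         "restraint": ["339", "340", "341", "342", "343"],
--         "hurt": ["319", "320", "321", "322"],
--         "evidence": ["191", "192", "193", "194"]
--     }
--
--     for crime_type, sections in section_mapping.items():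
--         if crime_type in query_lower and section_num in sections:
--             return True
--     return False
-- ===== SOURCE B (Python) =====
-- def _is_relevant_section(section_num, query):
--     """Check if section number is relevant to query"""
--     if len(section_num) != 3 or not section_num.isdigit():
--         return False
--     n = int(section_num)
--     if 191 <= n <= 194:
--         crime = "evidence"
--     elif 300 <= n <= 302 or n == 304:
--         crime = "murder"
--     elif 319 <= n <= 322:
--         crime = "hurt"
--     elif 339 <= n <= 343:
--         crime = "restraint"
--     elif 350 <= n <= 353:
--         crime = "assault"
--     elif 378 <= n <= 382:
--         crime = "theft"
--     elif 415 <= n <= 417 or n == 420: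
--         crime = "fraud"
--     else:
--         return False
--     return crime in query.lower()
-- ===== Notes on version B (the rewrite author's own statement) =====
-- stated objective: alternative
-- what changed: Replaced the scan over the seven (crime, sections) string-list pairs with arithmetic classification: validate that section_num is a 3-digit string, parse it to an integer, and pick the crime by numeric interval tests (the section lists are contiguous runs of numbers), then do a single substring test of that crime in the lowercased query.
import Mathlib
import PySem

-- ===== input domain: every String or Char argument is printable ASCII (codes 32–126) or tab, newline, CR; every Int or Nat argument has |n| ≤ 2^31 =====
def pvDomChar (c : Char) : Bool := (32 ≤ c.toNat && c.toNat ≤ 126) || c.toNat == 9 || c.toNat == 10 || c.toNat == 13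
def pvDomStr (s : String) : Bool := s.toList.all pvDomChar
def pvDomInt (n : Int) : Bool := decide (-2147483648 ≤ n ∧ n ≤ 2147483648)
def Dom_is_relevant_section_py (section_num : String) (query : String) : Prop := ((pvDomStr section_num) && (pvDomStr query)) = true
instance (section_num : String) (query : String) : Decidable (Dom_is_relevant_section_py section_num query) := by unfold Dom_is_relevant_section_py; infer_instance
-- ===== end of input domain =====

-- B replaces A's scan over the seven (crime, section-list) pairs with arithmetic
-- classification: validate a 3-digit section string, parse it to an integer and pick
-- the crime by numeric interval tests (objective: alternative; exact because each
-- section list is a finite set of 3-digit numbers).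

-- ===== PORT A =====
-- A's section_mapping dict, in insertion order (only iterated over, so a plain pair list).
def pvSectionMapping : List (String × List String) :=
  [("murder", ["300", "301", "302", "304"]),
   ("theft", ["378", "379", "380", "381", "382"]),
   ("assault", ["351", "352", "353", "350"]),
   ("fraud", ["415", "416", "417", "420"]),
   ("restraint", ["339", "340", "341", "342", "343"]),
   ("hurt", ["319", "320", "321", "322"]),
   ("evidence", ["191", "192", "193", "194"])]

-- A's for-loop with early 'return True': first pair whose crime_type is a substring of
-- query_lower and whose section list contains section_num.
def pvLoopA (query_lower : String) (section_num : String) : List (String × List String) → Bool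
  | [] => false
  | (crime_type, sections) :: rest =>
      if PySem.Str.isIn crime_type query_lower && sections.contains section_num then true
      else pvLoopA query_lower section_num rest

def is_relevant_section_py (section_num : String) (query : String) : Bool :=
  pvLoopA (PySem.Str.lower query) section_num pvSectionMapping

-- ===== PORT B =====
-- Source B step for step: the length-3/isdigit guard, int(section_num) (PySem.Int.ofStr?;
-- its 'none' arm is unreachable behind the guard on ASCII digits), the elif chain of
-- interval tests choosing 'crime', then 'crime in query.lower()'.
def is_relevant_section_py_alt (section_num : String) (query : String) : Bool :=
  if PySem.Str.len section_num ≠ 3 ∨ PySem.Str.strIsdigit section_num = false then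
    false
  else
    match PySem.Int.ofStr? section_num with
    | none => false
    | some n =>
      if 191 ≤ n ∧ n ≤ 194 then PySem.Str.isIn "evidence" (PySem.Str.lower query)
      else if (300 ≤ n ∧ n ≤ 302) ∨ n = 304 then PySem.Str.isIn "murder" (PySem.Str.lower query)
      else if 319 ≤ n ∧ n ≤ 322 then PySem.Str.isIn "hurt" (PySem.Str.lower query)
      else if 339 ≤ n ∧ n ≤ 343 then PySem.Str.isIn "restraint" (PySem.Str.lower query)
      else if 350 ≤ n ∧ n ≤ 353 then PySem.Str.isIn "assault" (PySem.Str.lower query)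
      else if 378 ≤ n ∧ n ≤ 382 then PySem.Str.isIn "theft" (PySem.Str.lower query)
      else if (415 ≤ n ∧ n ≤ 417) ∨ n = 420 then PySem.Str.isIn "fraud" (PySem.Str.lower query)
      else false

-- ===== PRECONDITION & SPEC =====
def Spec_is_relevant_section_py (section_num : String) (query : String) (out : Bool) : Prop := out = is_relevant_section_py_alt section_num query
instance (section_num : String) (query : String) (out : Bool) : Decidable (Spec_is_relevant_section_py section_num query out) := by unfold Spec_is_relevant_section_py; infer_instance

-- ===== CLAIM (what is proved, stated in full; the proofs are below) =====
def Claim_equal_is_relevant_section_py : Prop := ∀ (section_num : String) (query : String), Dom_is_relevant_section_py section_num query → Spec_is_relevant_section_py section_num query (is_relevant_section_py section_num query)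

-- ===== LEMMAS AND PROOFS =====

-- the 30 section-number strings appearing in A's table
def pvKeys : List String :=
  ["300", "301", "302", "304", "378", "379", "380", "381", "382",
   "351", "352", "353", "350", "415", "416", "417", "420",
   "339", "340", "341", "342", "343", "319", "320", "321", "322",
   "191", "192", "193", "194"]

theorem pv_parse3 : ∀ (a b c : Fin 10),
    PySem.Int.ofChars? [Char.ofNat (48 + a.val), Char.ofNat (48 + b.val), Char.ofNat (48 + c.val)]
      = some ((100 * a.val + 10 * b.val + c.val : Nat) : Int) := by decide
theorem pv_char (a : Char) (x : Nat) (hx : a.toNat = x) : a = Char.ofNat x := by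
  rw [← hx, Char.ofNat_toNat]
theorem pv_lit (s : String) (a b c : Char) (hs : s.toList = [a, b, c]) (x y z : Nat)
    (hx : a.toNat = x) (hy : b.toNat = y) (hz : c.toNat = z) :
    s = String.ofList [Char.ofNat x, Char.ofNat y, Char.ofNat z] := by
  have h := congrArg String.ofList hs
  rw [String.ofList_toList] at h
  rw [pv_char a x hx, pv_char b y hy, pv_char c z hz] at h
  exact h
theorem pv_mem (s : String) (a b c : Char) (hs : s.toList = [a, b, c]) (x y z : Nat)
    (hx : a.toNat = x) (hy : b.toNat = y) (hz : c.toNat = z)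
    (hlit : String.ofList [Char.ofNat x, Char.ofNat y, Char.ofNat z] ∈ pvKeys) : s ∈ pvKeys := by
  rw [pv_lit s a b c hs x y z hx hy hz]; exact hlit
theorem pv_parse3' (a b c : Char) (ha1 : 48 ≤ a.toNat) (ha2 : a.toNat ≤ 57)
    (hb1 : 48 ≤ b.toNat) (hb2 : b.toNat ≤ 57) (hc1 : 48 ≤ c.toNat) (hc2 : c.toNat ≤ 57) :
    PySem.Int.ofChars? [a, b, c]
      = some ((100 * (a.toNat - 48) + 10 * (b.toNat - 48) + (c.toNat - 48) : Nat) : Int) := by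
  have e1 : a = Char.ofNat (48 + (a.toNat - 48)) := by
    rw [show 48 + (a.toNat - 48) = a.toNat from by omega, Char.ofNat_toNat]
  have e2 : b = Char.ofNat (48 + (b.toNat - 48)) := by
    rw [show 48 + (b.toNat - 48) = b.toNat from by omega, Char.ofNat_toNat]
  have e3 : c = Char.ofNat (48 + (c.toNat - 48)) := by
    rw [show 48 + (c.toNat - 48) = c.toNat from by omega, Char.ofNat_toNat]
  conv_lhs => rw [e1, e2, e3]
  exact pv_parse3 ⟨a.toNat - 48, by omega⟩ ⟨b.toNat - 48, by omega⟩ ⟨c.toNat - 48, by omega⟩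
theorem pv_alt_false (s q : String) (hmem : s ∉ pvKeys) :
    is_relevant_section_py_alt s q = false := by
  unfold is_relevant_section_py_alt
  by_cases hg : PySem.Str.len s ≠ 3 ∨ PySem.Str.strIsdigit s = false
  · rw [if_pos hg]
  · push_neg at hg
    obtain ⟨hlen, hdig⟩ := hg
    rw [if_neg (by push_neg; exact ⟨hlen, hdig⟩)]
    have hlen' : s.toList.length = 3 := by have := PySem.Str.len_eq s; omega
    obtain ⟨a, b, c, hs⟩ : ∃ a b c, s.toList = [a, b, c] := by
      match h : s.toList, hlen' with
      | [a, b, c], _ => exact ⟨a, b, c, rfl⟩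
    have hdig' : PySem.Chars.isdigit a = true ∧ PySem.Chars.isdigit b = true ∧
        PySem.Chars.isdigit c = true := by
      rw [PySem.Str.strIsdigit, hs, PySem.Chars.strIsdigit] at hdig
      simpa using hdig
    have ha : 48 ≤ a.toNat ∧ a.toNat ≤ 57 := by
      have := hdig'.1; simp [PySem.Chars.isdigit, Char.le_def, Char.toNat] at this; exact this
    have hb : 48 ≤ b.toNat ∧ b.toNat ≤ 57 := by
      have := hdig'.2.1; simp [PySem.Chars.isdigit, Char.le_def, Char.toNat] at this; exact this
    have hc : 48 ≤ c.toNat ∧ c.toNat ≤ 57 := by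
      have := hdig'.2.2; simp [PySem.Chars.isdigit, Char.le_def, Char.toNat] at this; exact this
    have hparse : PySem.Int.ofStr? s
        = some ((100 * (a.toNat - 48) + 10 * (b.toNat - 48) + (c.toNat - 48) : Nat) : Int) := by
      rw [PySem.Int.ofStr?, hs]
      exact pv_parse3' a b c ha.1 ha.2 hb.1 hb.2 hc.1 hc.2
    rw [hparse]
    set n : Int := ((100 * (a.toNat - 48) + 10 * (b.toNat - 48) + (c.toNat - 48) : Nat) : Int) with hn
    have k1 : ¬(191 ≤ n ∧ n ≤ 194) := by
      intro hu
      have hd : a.toNat = 49 ∧ b.toNat = 57 ∧ (c.toNat = 49 ∨ c.toNat = 50 ∨ c.toNat = 51 ∨ c.toNat = 52) := by omega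
      rcases hd with ⟨hA, hB, hC | hC | hC | hC⟩ <;>
        exact hmem (pv_mem s a b c hs _ _ _ hA hB hC (by decide))
    have k2 : ¬((300 ≤ n ∧ n ≤ 302) ∨ n = 304) := by
      intro hu
      have hd : a.toNat = 51 ∧ b.toNat = 48 ∧ (c.toNat = 48 ∨ c.toNat = 49 ∨ c.toNat = 50 ∨ c.toNat = 52) := by omega
      rcases hd with ⟨hA, hB, hC | hC | hC | hC⟩ <;>
        exact hmem (pv_mem s a b c hs _ _ _ hA hB hC (by decide))
    have k3 : ¬(319 ≤ n ∧ n ≤ 322) := by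
      intro hu
      have hd : a.toNat = 51 ∧ ((b.toNat = 49 ∧ c.toNat = 57) ∨ (b.toNat = 50 ∧ (c.toNat = 48 ∨ c.toNat = 49 ∨ c.toNat = 50))) := by omega
      rcases hd with ⟨hA, ⟨hB, hC⟩ | ⟨hB, hC | hC | hC⟩⟩ <;>
        exact hmem (pv_mem s a b c hs _ _ _ hA hB hC (by decide))
    have k4 : ¬(339 ≤ n ∧ n ≤ 343) := by
      intro hu
      have hd : a.toNat = 51 ∧ ((b.toNat = 51 ∧ c.toNat = 57) ∨ (b.toNat = 52 ∧ (c.toNat = 48 ∨ c.toNat = 49 ∨ c.toNat = 50 ∨ c.toNat = 51))) := by omega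
      rcases hd with ⟨hA, ⟨hB, hC⟩ | ⟨hB, hC | hC | hC | hC⟩⟩ <;>
        exact hmem (pv_mem s a b c hs _ _ _ hA hB hC (by decide))
    have k5 : ¬(350 ≤ n ∧ n ≤ 353) := by
      intro hu
      have hd : a.toNat = 51 ∧ b.toNat = 53 ∧ (c.toNat = 48 ∨ c.toNat = 49 ∨ c.toNat = 50 ∨ c.toNat = 51) := by omega
      rcases hd with ⟨hA, hB, hC | hC | hC | hC⟩ <;>
        exact hmem (pv_mem s a b c hs _ _ _ hA hB hC (by decide))
    have k6 : ¬(378 ≤ n ∧ n ≤ 382) := by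
      intro hu
      have hd : a.toNat = 51 ∧ ((b.toNat = 55 ∧ (c.toNat = 56 ∨ c.toNat = 57)) ∨ (b.toNat = 56 ∧ (c.toNat = 48 ∨ c.toNat = 49 ∨ c.toNat = 50))) := by omega
      rcases hd with ⟨hA, ⟨hB, hC | hC⟩ | ⟨hB, hC | hC | hC⟩⟩ <;>
        exact hmem (pv_mem s a b c hs _ _ _ hA hB hC (by decide))
    have k7 : ¬((415 ≤ n ∧ n ≤ 417) ∨ n = 420) := by
      intro hu
      have hd : a.toNat = 52 ∧ ((b.toNat = 49 ∧ (c.toNat = 53 ∨ c.toNat = 54 ∨ c.toNat = 55)) ∨ (b.toNat = 50 ∧ c.toNat = 48)) := by omega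
      rcases hd with ⟨hA, ⟨hB, hC | hC | hC⟩ | ⟨hB, hC⟩⟩ <;>
        exact hmem (pv_mem s a b c hs _ _ _ hA hB hC (by decide))
    simp [k1, k2, k3, k4, k5, k6, k7]

theorem pv_A_false (s q : String) (hmem : s ∉ pvKeys) : is_relevant_section_py s q = false := by
  simp only [pvKeys, List.mem_cons, List.mem_singleton, not_or] at hmem
  obtain ⟨h0, h1, h2, h3, h4, h5, h6, h7, h8, h9, h10, h11, h12, h13, h14, h15, h16, h17,
    h18, h19, h20, h21, h22, h23, h24, h25, h26, h27, h28, h29⟩ := hmem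
  simp [is_relevant_section_py, pvLoopA, pvSectionMapping, h0, h1, h2, h3, h4, h5, h6, h7,
    h8, h9, h10, h11, h12, h13, h14, h15, h16, h17, h18, h19, h20, h21, h22, h23, h24, h25,
    h26, h27, h28, h29]

theorem pv_agree (s q : String) :
    is_relevant_section_py s q = is_relevant_section_py_alt s q := by
  by_cases hmem : s ∈ pvKeys
  · fin_cases hmem
    · simp [is_relevant_section_py, is_relevant_section_py_alt, pvLoopA, pvSectionMapping,
        PySem.Chars.strIsdigit, PySem.Chars.isdigit,
        (by decide : PySem.Int.ofStr? "300" = some 300)]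
    · simp [is_relevant_section_py, is_relevant_section_py_alt, pvLoopA, pvSectionMapping,
        PySem.Chars.strIsdigit, PySem.Chars.isdigit,
        (by decide : PySem.Int.ofStr? "301" = some 301)]
    · simp [is_relevant_section_py, is_relevant_section_py_alt, pvLoopA, pvSectionMapping,
        PySem.Chars.strIsdigit, PySem.Chars.isdigit,
        (by decide : PySem.Int.ofStr? "302" = some 302)]
    · simp [is_relevant_section_py, is_relevant_section_py_alt, pvLoopA, pvSectionMapping,
        PySem.Chars.strIsdigit, PySem.Chars.isdigit,
        (by decide : PySem.Int.ofStr? "304" = some 304)]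
    · simp [is_relevant_section_py, is_relevant_section_py_alt, pvLoopA, pvSectionMapping,
        PySem.Chars.strIsdigit, PySem.Chars.isdigit,
        (by decide : PySem.Int.ofStr? "378" = some 378)]
    · simp [is_relevant_section_py, is_relevant_section_py_alt, pvLoopA, pvSectionMapping,
        PySem.Chars.strIsdigit, PySem.Chars.isdigit,
        (by decide : PySem.Int.ofStr? "379" = some 379)]
    · simp [is_relevant_section_py, is_relevant_section_py_alt, pvLoopA, pvSectionMapping,
        PySem.Chars.strIsdigit, PySem.Chars.isdigit,
        (by decide : PySem.Int.ofStr? "380" = some 380)]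
    · simp [is_relevant_section_py, is_relevant_section_py_alt, pvLoopA, pvSectionMapping,
        PySem.Chars.strIsdigit, PySem.Chars.isdigit,
        (by decide : PySem.Int.ofStr? "381" = some 381)]
    · simp [is_relevant_section_py, is_relevant_section_py_alt, pvLoopA, pvSectionMapping,
        PySem.Chars.strIsdigit, PySem.Chars.isdigit,
        (by decide : PySem.Int.ofStr? "382" = some 382)]
    · simp [is_relevant_section_py, is_relevant_section_py_alt, pvLoopA, pvSectionMapping,
        PySem.Chars.strIsdigit, PySem.Chars.isdigit,
        (by decide : PySem.Int.ofStr? "351" = some 351)]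
    · simp [is_relevant_section_py, is_relevant_section_py_alt, pvLoopA, pvSectionMapping,
        PySem.Chars.strIsdigit, PySem.Chars.isdigit,
        (by decide : PySem.Int.ofStr? "352" = some 352)]
    · simp [is_relevant_section_py, is_relevant_section_py_alt, pvLoopA, pvSectionMapping,
        PySem.Chars.strIsdigit, PySem.Chars.isdigit,
        (by decide : PySem.Int.ofStr? "353" = some 353)]
    · simp [is_relevant_section_py, is_relevant_section_py_alt, pvLoopA, pvSectionMapping,
        PySem.Chars.strIsdigit, PySem.Chars.isdigit,
        (by decide : PySem.Int.ofStr? "350" = some 350)]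
    · simp [is_relevant_section_py, is_relevant_section_py_alt, pvLoopA, pvSectionMapping,
        PySem.Chars.strIsdigit, PySem.Chars.isdigit,
        (by decide : PySem.Int.ofStr? "415" = some 415)]
    · simp [is_relevant_section_py, is_relevant_section_py_alt, pvLoopA, pvSectionMapping,
        PySem.Chars.strIsdigit, PySem.Chars.isdigit,
        (by decide : PySem.Int.ofStr? "416" = some 416)]
    · simp [is_relevant_section_py, is_relevant_section_py_alt, pvLoopA, pvSectionMapping,
        PySem.Chars.strIsdigit, PySem.Chars.isdigit,
        (by decide : PySem.Int.ofStr? "417" = some 417)]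
    · simp [is_relevant_section_py, is_relevant_section_py_alt, pvLoopA, pvSectionMapping,
        PySem.Chars.strIsdigit, PySem.Chars.isdigit,
        (by decide : PySem.Int.ofStr? "420" = some 420)]
    · simp [is_relevant_section_py, is_relevant_section_py_alt, pvLoopA, pvSectionMapping,
        PySem.Chars.strIsdigit, PySem.Chars.isdigit,
        (by decide : PySem.Int.ofStr? "339" = some 339)]
    · simp [is_relevant_section_py, is_relevant_section_py_alt, pvLoopA, pvSectionMapping,
        PySem.Chars.strIsdigit, PySem.Chars.isdigit,
        (by decide : PySem.Int.ofStr? "340" = some 340)]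
    · simp [is_relevant_section_py, is_relevant_section_py_alt, pvLoopA, pvSectionMapping,
        PySem.Chars.strIsdigit, PySem.Chars.isdigit,
        (by decide : PySem.Int.ofStr? "341" = some 341)]
    · simp [is_relevant_section_py, is_relevant_section_py_alt, pvLoopA, pvSectionMapping,
        PySem.Chars.strIsdigit, PySem.Chars.isdigit,
        (by decide : PySem.Int.ofStr? "342" = some 342)]
    · simp [is_relevant_section_py, is_relevant_section_py_alt, pvLoopA, pvSectionMapping,
        PySem.Chars.strIsdigit, PySem.Chars.isdigit,
        (by decide : PySem.Int.ofStr? "343" = some 343)]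
    · simp [is_relevant_section_py, is_relevant_section_py_alt, pvLoopA, pvSectionMapping,
        PySem.Chars.strIsdigit, PySem.Chars.isdigit,
        (by decide : PySem.Int.ofStr? "319" = some 319)]
    · simp [is_relevant_section_py, is_relevant_section_py_alt, pvLoopA, pvSectionMapping,
        PySem.Chars.strIsdigit, PySem.Chars.isdigit,
        (by decide : PySem.Int.ofStr? "320" = some 320)]
    · simp [is_relevant_section_py, is_relevant_section_py_alt, pvLoopA, pvSectionMapping,
        PySem.Chars.strIsdigit, PySem.Chars.isdigit,
        (by decide : PySem.Int.ofStr? "321" = some 321)]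
    · simp [is_relevant_section_py, is_relevant_section_py_alt, pvLoopA, pvSectionMapping,
        PySem.Chars.strIsdigit, PySem.Chars.isdigit,
        (by decide : PySem.Int.ofStr? "322" = some 322)]
    · simp [is_relevant_section_py, is_relevant_section_py_alt, pvLoopA, pvSectionMapping,
        PySem.Chars.strIsdigit, PySem.Chars.isdigit,
        (by decide : PySem.Int.ofStr? "191" = some 191)]
    · simp [is_relevant_section_py, is_relevant_section_py_alt, pvLoopA, pvSectionMapping,
        PySem.Chars.strIsdigit, PySem.Chars.isdigit,
        (by decide : PySem.Int.ofStr? "192" = some 192)]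
    · simp [is_relevant_section_py, is_relevant_section_py_alt, pvLoopA, pvSectionMapping,
        PySem.Chars.strIsdigit, PySem.Chars.isdigit,
        (by decide : PySem.Int.ofStr? "193" = some 193)]
    · simp [is_relevant_section_py, is_relevant_section_py_alt, pvLoopA, pvSectionMapping,
        PySem.Chars.strIsdigit, PySem.Chars.isdigit,
        (by decide : PySem.Int.ofStr? "194" = some 194)]
  · rw [pv_A_false s q hmem, pv_alt_false s q hmem]

-- ===== VERDICT (by name: the statement is the Claim_ definition above) =====
theorem is_relevant_section_py_spec : Claim_equal_is_relevant_section_py := by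
  intro section_num query _
  unfold Spec_is_relevant_section_py
  exact pv_agree section_num query
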